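-- pv_equiv track=rewrite | github.com/jboero/f3p | f3p/f3p.py | verdict_from_findings
-- ===== SOURCE A (Python) =====
-- def verdict_from_findings(findings):
--     crit = sum(1 for s, _ in findings if s == "CRITICAL")
--     high = sum(1 for s, _ in findings if s == "HIGH")
--     warn = sum(1 for s, _ in findings if s == "WARN")
--     if crit > 0:
--         label, tier = "LIKELY COUNTERFEIT / COMPROMISED", "critical"
--     elif high > 0:
--         label, tier = "SUSPICIOUS - review findings", "high"
--     elif warn > 0:
--         label, tier = "MINOR FLAGS - probably OK", "warn"
--     else:
--         label, tier = "No critical findings", "ok"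
--     return label, tier, crit, high, warn
-- ===== SOURCE B (Python) =====
-- def verdict_from_findings(findings):
--     crit = high = warn = 0
--     for s, _ in findings:
--         if s == "CRITICAL":
--             crit += 1
--         elif s == "HIGH":
--             high += 1
--         elif s == "WARN":
--             warn += 1
--     if crit > 0:
--         label, tier = "LIKELY COUNTERFEIT / COMPROMISED", "critical"
--     elif high > 0:
--         label, tier = "SUSPICIOUS - review findings", "high"
--     elif warn > 0:
--         label, tier = "MINOR FLAGS - probably OK", "warn"
--     else:
--         label, tier = "No critical findings", "ok"
--     return label, tier, crit, high, warn
-- ===== Notes on version B (the rewrite author's own statement) =====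
-- stated objective: simpler
-- what changed: Replaces three separate generator-sum passes over findings with one loop maintaining three integer counters via an if/elif chain.
import Mathlib
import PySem

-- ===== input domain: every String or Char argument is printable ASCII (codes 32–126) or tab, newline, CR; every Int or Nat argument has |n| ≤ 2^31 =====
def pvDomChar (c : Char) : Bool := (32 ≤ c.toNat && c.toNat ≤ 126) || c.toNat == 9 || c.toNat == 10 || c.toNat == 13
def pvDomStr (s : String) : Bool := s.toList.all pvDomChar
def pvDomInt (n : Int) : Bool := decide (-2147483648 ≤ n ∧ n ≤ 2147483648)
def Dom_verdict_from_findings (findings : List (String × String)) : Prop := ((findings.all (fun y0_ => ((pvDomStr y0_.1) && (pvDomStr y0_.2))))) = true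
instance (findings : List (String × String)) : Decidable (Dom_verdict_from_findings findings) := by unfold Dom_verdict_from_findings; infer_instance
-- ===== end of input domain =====

-- B replaces A's three generator-sum passes with a single loop over explicit counters (objective: simpler).

-- ===== PORT A =====
-- each 'sum(1 for s, _ in findings if s == SEV)' is this fold
def pvSumCount (sev : String) (findings : List (String × String)) : Int :=
  findings.foldl (fun acc p => if p.1 = sev then acc + 1 else acc) 0

def verdict_from_findings (findings : List (String × String)) : String × String × Int × Int × Int :=
  let crit := pvSumCount "CRITICAL" findings
  let high := pvSumCount "HIGH" findings
  let warn := pvSumCount "WARN" findings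
  if crit > 0 then ("LIKELY COUNTERFEIT / COMPROMISED", "critical", crit, high, warn)
  else if high > 0 then ("SUSPICIOUS - review findings", "high", crit, high, warn)
  else if warn > 0 then ("MINOR FLAGS - probably OK", "warn", crit, high, warn)
  else ("No critical findings", "ok", crit, high, warn)

-- ===== PORT B =====
-- the single counting loop of Source B
def pvCountLoop : List (String × String) → Int × Int × Int → Int × Int × Int
  | [], acc => acc
  | p :: rest, (c, h, w) =>
      pvCountLoop rest
        (if p.1 = "CRITICAL" then (c + 1, h, w)
         else if p.1 = "HIGH" then (c, h + 1, w)
         else if p.1 = "WARN" then (c, h, w + 1)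
         else (c, h, w))

def verdict_from_findings_alt (findings : List (String × String)) : String × String × Int × Int × Int :=
  let (crit, high, warn) := pvCountLoop findings (0, 0, 0)
  if crit > 0 then ("LIKELY COUNTERFEIT / COMPROMISED", "critical", crit, high, warn)
  else if high > 0 then ("SUSPICIOUS - review findings", "high", crit, high, warn)
  else if warn > 0 then ("MINOR FLAGS - probably OK", "warn", crit, high, warn)
  else ("No critical findings", "ok", crit, high, warn)

-- ===== PRECONDITION & SPEC =====
def Spec_verdict_from_findings (findings : List (String × String)) (out : String × String × Int × Int × Int) : Prop := out = verdict_from_findings_alt findings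
instance (findings : List (String × String)) (out : String × String × Int × Int × Int) : Decidable (Spec_verdict_from_findings findings out) := by unfold Spec_verdict_from_findings; infer_instance

-- ===== CLAIM (what is proved, stated in full; the proofs are below) =====
def Claim_equal_verdict_from_findings : Prop := ∀ (findings : List (String × String)), Dom_verdict_from_findings findings → Spec_verdict_from_findings findings (verdict_from_findings findings)

-- ===== LEMMAS AND PROOFS =====

theorem pvFoldShift (sev : String) (l : List (String × String)) (a : Int) :
    l.foldl (fun acc p => if p.1 = sev then acc + 1 else acc) a
      = a + l.foldl (fun acc p => if p.1 = sev then acc + 1 else acc) 0 := by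
  induction l generalizing a with
  | nil => simp
  | cons p rest ih =>
      simp only [List.foldl_cons]
      rw [ih (if p.1 = sev then a + 1 else a), ih (if p.1 = sev then 0 + 1 else 0)]
      split_ifs <;> omega

theorem pvSumCount_cons (sev : String) (p : String × String) (rest : List (String × String)) :
    pvSumCount sev (p :: rest) = (if p.1 = sev then 1 else 0) + pvSumCount sev rest := by
  have h := pvFoldShift sev rest (if p.1 = sev then (0 : Int) + 1 else 0)
  simp only [pvSumCount, List.foldl_cons]
  rw [h]
  split_ifs <;> omega

theorem pvCountLoop_eq (findings : List (String × String)) (c h w : Int) :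
    pvCountLoop findings (c, h, w) =
      (c + pvSumCount "CRITICAL" findings, h + pvSumCount "HIGH" findings, w + pvSumCount "WARN" findings) := by
  induction findings generalizing c h w with
  | nil => simp [pvCountLoop, pvSumCount]
  | cons p rest ih =>
      simp only [pvCountLoop, pvSumCount_cons]
      split_ifs
      all_goals rw [ih]
      all_goals simp only [Prod.mk.injEq]
      all_goals first
        | refine ⟨by omega, by omega, by omega⟩
        | (exfalso; simp_all)

-- ===== VERDICT (by name: the statement is the Claim_ definition above) =====
theorem verdict_from_findings_spec : Claim_equal_verdict_from_findings := by
  intro findings _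
  unfold Spec_verdict_from_findings verdict_from_findings verdict_from_findings_alt
  rw [pvCountLoop_eq]
  simp
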